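-- pv_equiv track=rewrite | github.com/li1fang/AiUE | tools/t1/python/aiue_t1/test_governance.py | resolve_lane_ids
-- ===== SOURCE A (Python) =====
-- RECOMMENDED_T2_DEFAULT_PATHS = {
--     "tools/t2/python/aiue_t2/state.py",
--     "tools/t2/python/aiue_t2/ui.py",
--     "tools/t2/python/aiue_t2/ui_demo.py",
--     "tools/t2/python/aiue_t2/workbench_demo_ops.py",
-- }
--
-- T1_TRIGGER_PREFIXES = (
--     "tools/t1/python/aiue_t1/",
--     "tests/t1/",
-- )
--
-- T1_TRIGGER_EXACT = {
--     "tools/run_t1_evidence_pack.ps1",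
--     "tools/run_dynamic_balance.ps1",
--     "tools/run_test_governance.ps1",
-- }
--
-- T2_TRIGGER_PREFIXES = (
--     "tools/t2/python/aiue_t2/",
--     "tests/t2/",
-- )
--
-- T2_TRIGGER_PREFIX_GLOBS = (
--     "tools/run_t2_workbench",
-- )
--
-- DEFAULT_LANE_POLICY = {
--     "change_source_default": "worktree",
--     "required_base_lane_ids": [
--         "repo_surface",
--         "schema_contracts",
--     ],
--     "recommended_t2_default_paths": sorted(RECOMMENDED_T2_DEFAULT_PATHS),
--     "lane_catalog": {
--         "repo_surface": "python tools/check_repo_surface.py",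
--         "schema_contracts": "python tools/check_schema_contracts.py",
--         "t1_default": "python -m pytest tests/t1 -q",
--         "t2_smoke": "powershell tools/run_t2_workbench_tests.ps1 -Profile smoke",
--         "t2_default": "powershell tools/run_t2_workbench_tests.ps1 -Profile default -SkipSoak",
--     },
-- }
--
-- def resolve_lane_ids(changed_paths: list[str]) -> tuple[list[str], list[str]]:
--     normalized_paths = [str(path or "").replace("\\", "/") for path in changed_paths if str(path or "").strip()]
--     required = set(DEFAULT_LANE_POLICY["required_base_lane_ids"])
--     recommended: set[str] = set()
--
--     if any(path.startswith(T1_TRIGGER_PREFIXES) or path in T1_TRIGGER_EXACT for path in normalized_paths):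
--         required.add("t1_default")
--     if any(
--         path.startswith(T2_TRIGGER_PREFIXES) or any(path.startswith(prefix) for prefix in T2_TRIGGER_PREFIX_GLOBS)
--         for path in normalized_paths
--     ):
--         required.add("t2_smoke")
--     if any(path in RECOMMENDED_T2_DEFAULT_PATHS for path in normalized_paths):
--         recommended.add("t2_default")
--
--     ordered_required = [lane_id for lane_id in ["repo_surface", "schema_contracts", "t1_default", "t2_smoke"] if lane_id in required]
--     ordered_recommended = [lane_id for lane_id in ["t2_default"] if lane_id in recommended]
--     return ordered_required, ordered_recommended
-- ===== SOURCE B (Python) =====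
-- RECOMMENDED_T2_DEFAULT_PATHS = {
--     "tools/t2/python/aiue_t2/state.py",
--     "tools/t2/python/aiue_t2/ui.py",
--     "tools/t2/python/aiue_t2/ui_demo.py",
--     "tools/t2/python/aiue_t2/workbench_demo_ops.py",
-- }
--
-- T1_TRIGGER_PREFIXES = (
--     "tools/t1/python/aiue_t1/",
--     "tests/t1/",
-- )
--
-- T1_TRIGGER_EXACT = {
--     "tools/run_t1_evidence_pack.ps1",
--     "tools/run_dynamic_balance.ps1",
--     "tools/run_test_governance.ps1",
-- }
--
-- T2_TRIGGER_PREFIXES = (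
--     "tools/t2/python/aiue_t2/",
--     "tests/t2/",
-- )
--
-- T2_TRIGGER_PREFIX_GLOBS = (
--     "tools/run_t2_workbench",
-- )
--
--
-- def _t1_hit(p):
--     return p.startswith(T1_TRIGGER_PREFIXES) or p in T1_TRIGGER_EXACT
--
--
-- def _t2_hit(p):
--     return p.startswith(T2_TRIGGER_PREFIXES) or any(p.startswith(g) for g in T2_TRIGGER_PREFIX_GLOBS)
--
--
-- def _rec_hit(p):
--     return p in RECOMMENDED_T2_DEFAULT_PATHS
--
--
-- def resolve_lane_ids(changed_paths):
--     t1 = t2 = rec = False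
--     for path in changed_paths:
--         if not str(path or "").strip():
--             continue
--         p = str(path or "").replace("\\", "/")
--         t1 = t1 or _t1_hit(p)
--         t2 = t2 or _t2_hit(p)
--         rec = rec or _rec_hit(p)
--     required = ["repo_surface", "schema_contracts"]
--     if t1:
--         required.append("t1_default")
--     if t2:
--         required.append("t2_smoke")
--     recommended = ["t2_default"] if rec else []
--     return required, recommended
-- ===== Notes on version B (the rewrite author's own statement) =====
-- stated objective: alternative
-- what changed: Replaces three independent any()-scans over a pre-built normalized list and set-membership bookkeeping with a single pass over changed_paths that normalizes each path once and accumulates three booleans, then assembles the ordered output lists directly instead of filtering a lane catalog against sets.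
import Mathlib
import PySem

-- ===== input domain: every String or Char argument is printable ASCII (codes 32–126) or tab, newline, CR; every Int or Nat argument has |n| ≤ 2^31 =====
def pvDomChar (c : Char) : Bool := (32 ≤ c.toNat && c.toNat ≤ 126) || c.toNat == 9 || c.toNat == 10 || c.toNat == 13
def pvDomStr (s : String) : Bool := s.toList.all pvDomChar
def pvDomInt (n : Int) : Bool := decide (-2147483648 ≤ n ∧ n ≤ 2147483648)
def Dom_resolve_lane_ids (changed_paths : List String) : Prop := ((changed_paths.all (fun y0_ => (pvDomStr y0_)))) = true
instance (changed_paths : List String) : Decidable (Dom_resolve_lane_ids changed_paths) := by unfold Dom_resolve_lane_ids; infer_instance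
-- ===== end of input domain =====

-- B: one pass over changed_paths accumulating three hit-booleans, building the output lists directly
-- (alternative decomposition; same asymptotic cost).

-- ===== PORT A =====
def pvRecommendedT2DefaultPaths : PySem.Set String := PySem.Set.ofList
  ["tools/t2/python/aiue_t2/state.py", "tools/t2/python/aiue_t2/ui.py",
   "tools/t2/python/aiue_t2/ui_demo.py", "tools/t2/python/aiue_t2/workbench_demo_ops.py"]

def pvT1TriggerPrefixes : List String := ["tools/t1/python/aiue_t1/", "tests/t1/"]

def pvT1TriggerExact : PySem.Set String := PySem.Set.ofList
  ["tools/run_t1_evidence_pack.ps1", "tools/run_dynamic_balance.ps1", "tools/run_test_governance.ps1"]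

def pvT2TriggerPrefixes : List String := ["tools/t2/python/aiue_t2/", "tests/t2/"]

def pvT2TriggerPrefixGlobs : List String := ["tools/run_t2_workbench"]

def resolve_lane_ids (changed_paths : List String) : List String × List String :=
  -- [str(path or "").replace("\\","/") for path in changed_paths if str(path or "").strip()]
  -- (str(path or "") = path for a string argument, "" included)
  let normalized_paths :=
    (changed_paths.filter (fun path => !(PySem.Str.strip path == ""))).map
      (fun path => PySem.Str.replace path "\\" "/")
  let required : PySem.Set String := PySem.Set.ofList ["repo_surface", "schema_contracts"]
  let required :=
    if normalized_paths.any (fun path =>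
        pvT1TriggerPrefixes.any (fun pre => PySem.Str.startswith path pre)
          || PySem.Set.contains pvT1TriggerExact path) then
      PySem.Set.add required "t1_default"
    else required
  let required :=
    if normalized_paths.any (fun path =>
        pvT2TriggerPrefixes.any (fun pre => PySem.Str.startswith path pre)
          || pvT2TriggerPrefixGlobs.any (fun prefix_ => PySem.Str.startswith path prefix_)) then
      PySem.Set.add required "t2_smoke"
    else required
  let recommended : PySem.Set String :=
    if normalized_paths.any (fun path => PySem.Set.contains pvRecommendedT2DefaultPaths path) then
      PySem.Set.add PySem.Set.empty "t2_default"
    else PySem.Set.empty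
  let ordered_required :=
    ["repo_surface", "schema_contracts", "t1_default", "t2_smoke"].filter
      (fun lane_id => PySem.Set.contains required lane_id)
  let ordered_recommended :=
    ["t2_default"].filter (fun lane_id => PySem.Set.contains recommended lane_id)
  (ordered_required, ordered_recommended)

-- ===== PORT B =====
def pvT1Hit (p : String) : Bool :=
  pvT1TriggerPrefixes.any (fun pre => PySem.Str.startswith p pre)
    || PySem.Set.contains pvT1TriggerExact p

def pvT2Hit (p : String) : Bool :=
  pvT2TriggerPrefixes.any (fun pre => PySem.Str.startswith p pre)
    || pvT2TriggerPrefixGlobs.any (fun g => PySem.Str.startswith p g)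

def pvRecHit (p : String) : Bool := PySem.Set.contains pvRecommendedT2DefaultPaths p

def pvHitsStep (acc : Bool × Bool × Bool) (path : String) : Bool × Bool × Bool :=
  if PySem.Str.strip path == "" then acc
  else
    let p := PySem.Str.replace path "\\" "/"
    (acc.1 || pvT1Hit p, acc.2.1 || pvT2Hit p, acc.2.2 || pvRecHit p)

def resolve_lane_ids_alt (changed_paths : List String) : List String × List String :=
  let hits := changed_paths.foldl pvHitsStep (false, false, false)
  let required := ["repo_surface", "schema_contracts"]
    ++ (if hits.1 then ["t1_default"] else [])
    ++ (if hits.2.1 then ["t2_smoke"] else [])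
  let recommended := if hits.2.2 then ["t2_default"] else []
  (required, recommended)

-- ===== PRECONDITION & SPEC =====
def Spec_resolve_lane_ids (changed_paths : List String) (out : List String × List String) : Prop := out = resolve_lane_ids_alt changed_paths
instance (changed_paths : List String) (out : List String × List String) : Decidable (Spec_resolve_lane_ids changed_paths out) := by unfold Spec_resolve_lane_ids; infer_instance

-- ===== CLAIM (what is proved, stated in full; the proofs are below) =====
def Claim_equal_resolve_lane_ids : Prop := ∀ (changed_paths : List String), Dom_resolve_lane_ids changed_paths → Spec_resolve_lane_ids changed_paths (resolve_lane_ids changed_paths)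

-- ===== LEMMAS AND PROOFS =====

-- B's fold computes, in each component, the same 'any' A computes over the normalized list.
theorem pvHits_foldl (changed_paths : List String) (a b c : Bool) :
    changed_paths.foldl pvHitsStep (a, b, c) =
      (a || ((changed_paths.filter (fun p => !(PySem.Str.strip p == ""))).map
              (fun p => PySem.Str.replace p "\\" "/")).any (fun path =>
                pvT1TriggerPrefixes.any (fun pre => PySem.Str.startswith path pre)
                  || PySem.Set.contains pvT1TriggerExact path),
       b || ((changed_paths.filter (fun p => !(PySem.Str.strip p == ""))).map
              (fun p => PySem.Str.replace p "\\" "/")).any (fun path =>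
                pvT2TriggerPrefixes.any (fun pre => PySem.Str.startswith path pre)
                  || pvT2TriggerPrefixGlobs.any (fun prefix_ => PySem.Str.startswith path prefix_)),
       c || ((changed_paths.filter (fun p => !(PySem.Str.strip p == ""))).map
              (fun p => PySem.Str.replace p "\\" "/")).any (fun path =>
                PySem.Set.contains pvRecommendedT2DefaultPaths path)) := by
  induction changed_paths generalizing a b c with
  | nil => simp
  | cons x xs ih =>
    by_cases hx : PySem.Str.strip x == ""
    · simp [List.foldl_cons, pvHitsStep, hx, ih]
    · simp [List.foldl_cons, pvHitsStep, hx, ih, pvT1Hit, pvT2Hit, pvRecHit, Bool.or_assoc]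

theorem resolve_lane_ids_spec : Claim_equal_resolve_lane_ids := by
  intro changed_paths _
  unfold Spec_resolve_lane_ids resolve_lane_ids resolve_lane_ids_alt
  rw [pvHits_foldl]
  simp only [Bool.false_or]
  set norm := (changed_paths.filter (fun p => !(PySem.Str.strip p == ""))).map
      (fun p => PySem.Str.replace p "\\" "/") with hnorm
  cases h1 : norm.any (fun path =>
      pvT1TriggerPrefixes.any (fun pre => PySem.Str.startswith path pre)
        || PySem.Set.contains pvT1TriggerExact path) <;>
    cases h2 : norm.any (fun path =>
      pvT2TriggerPrefixes.any (fun pre => PySem.Str.startswith path pre)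
        || pvT2TriggerPrefixGlobs.any (fun prefix_ => PySem.Str.startswith path prefix_)) <;>
    cases h3 : norm.any (fun path => PySem.Set.contains pvRecommendedT2DefaultPaths path) <;>
    decide
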